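-- pv_equiv track=rewrite | github.com/1vladal1/Lottery_ideas | Lottery_Keno/ver_0.2/lpm.py | next_value
-- ===== SOURCE A (Python) =====
-- def is_exist_pattern(vector, pattern):
--     result = False
--     for i in range(len(vector)-len(pattern)):
--         if vector[i:i+len(pattern)] == pattern:
--             result = True
--             break
--     return result
--
-- def value(vector, pattern):
--     for i in range(len(vector)-len(pattern)):
--         if vector[i:i+len(pattern)] == pattern:
--             result = vector[i+len(pattern)]
--             break
--     return result
--
-- def next_value(vector):
--     flag = False
--     for i in range(1,len(vector)+1):
--         pattern = vector[-i:]
--         if not is_exist_pattern(vector, pattern) and not flag: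
--             result = vector[1]
--             break
--         elif is_exist_pattern(vector, pattern):
--             flag = True
--             tmp = pattern
--         elif not is_exist_pattern(vector, pattern) and flag:
--             break
--     if flag:
--         result = value(vector, tmp)
--     else:
--         result = vector[1]
--     return result
-- ===== SOURCE B (Python) =====
-- def next_value(vector):
--     # one pass over end positions: for each e, the length of the longest
--     # common suffix of vector[:e+1] and vector; keep the first maximum.
--     n = len(vector)
--     best_k = 0
--     nxt = vector[1]
--     for e in range(n - 1):
--         t = 0
--         while t <= e and vector[e - t] == vector[n - 1 - t]:
--             t += 1
--         if t > best_k: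
--             best_k = t
--             nxt = vector[e + 1]
--     return nxt
-- ===== Notes on version B (the rewrite author's own statement) =====
-- stated objective: alternative
-- what changed: Instead of repeatedly re-scanning the list for each suffix length with slice comparisons (three is_exist_pattern calls per length plus a final value() scan), B makes a single pass over end positions, computing for each the longest common suffix with the whole vector by direct element comparison, and keeps the element after the first maximal match.
import Mathlib
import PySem

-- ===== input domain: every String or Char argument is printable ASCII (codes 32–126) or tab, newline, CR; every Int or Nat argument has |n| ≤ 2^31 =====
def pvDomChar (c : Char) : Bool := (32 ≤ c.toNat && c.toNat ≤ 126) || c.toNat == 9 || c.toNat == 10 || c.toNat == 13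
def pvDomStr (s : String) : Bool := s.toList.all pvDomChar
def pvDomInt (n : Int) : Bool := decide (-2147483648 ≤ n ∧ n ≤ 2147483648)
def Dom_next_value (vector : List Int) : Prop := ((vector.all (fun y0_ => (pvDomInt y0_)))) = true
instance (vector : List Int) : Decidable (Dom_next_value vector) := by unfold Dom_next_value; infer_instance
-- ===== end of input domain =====

-- B replaces A's repeated suffix re-scans (is_exist_pattern/value slice loops) by a single
-- pass over end positions, keeping the element after the first longest suffix match;
-- equivalence proved for vectors of length ≥ 2 (A raises IndexError below that).

-- ===== PORT A =====
-- for i in range(len(vector)-len(pattern)): if vector[i:i+len(pattern)] == pattern: result = True; break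
def isExistLoop (vector pattern : List Int) : List Int → Bool
  | [] => false
  | i :: rest =>
    if PySem.List.slice vector (some i) (some (i + (pattern.length : Int))) = pattern
    then true
    else isExistLoop vector pattern rest

def is_exist_pattern (vector pattern : List Int) : Bool :=
  isExistLoop vector pattern (PySem.List.pyRange 0 ((vector.length : Int) - (pattern.length : Int)) 1)

-- value(): first i whose slice matches; none models the NameError path (no match),
-- never reached by next_value since it only calls value on a pattern known to occur.
def valueLoop (vector pattern : List Int) : List Int → Option Int
  | [] => none
  | i :: rest =>
    if PySem.List.slice vector (some i) (some (i + (pattern.length : Int))) = pattern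
    then PySem.List.pyGet? vector (i + (pattern.length : Int))
    else valueLoop vector pattern rest

def value (vector pattern : List Int) : Option Int :=
  valueLoop vector pattern (PySem.List.pyRange 0 ((vector.length : Int) - (pattern.length : Int)) 1)

-- the main loop: state (flag, tmp); the in-loop 'result = vector[1]' assignments are dead
-- (result is unconditionally reassigned after the loop), so only break/continue matters.
def nvLoop (vector : List Int) : List Int → Bool → List Int → Bool × List Int
  | [], flag, tmp => (flag, tmp)
  | i :: rest, flag, tmp =>
    let pattern := PySem.List.slice vector (some (-i)) none
    if !is_exist_pattern vector pattern && !flag then (flag, tmp)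
    else if is_exist_pattern vector pattern then nvLoop vector rest true pattern
    else (flag, tmp)

def next_value (vector : List Int) : Int :=
  let st := nvLoop vector (PySem.List.pyRange 1 ((vector.length : Int) + 1) 1) false []
  if st.1 then (value vector st.2).getD 0
  else (PySem.List.pyGet? vector 1).getD 0

-- ===== PORT B =====
-- while t <= e and vector[e-t] == vector[n-1-t]: t += 1   (indices provably in range)
def lcsLoop (vector : List Int) (n e : Nat) (t : Nat) : Nat :=
  if t ≤ e ∧ vector.getD (e - t) 0 = vector.getD (n - 1 - t) 0
  then lcsLoop vector n e (t + 1)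
  else t
termination_by e + 1 - t
decreasing_by omega

def bestLoop (vector : List Int) (n : Nat) : List Nat → Nat × Int → Nat × Int
  | [], st => st
  | e :: rest, (bestK, nxt) =>
    let t := lcsLoop vector n e 0
    if bestK < t then bestLoop vector n rest (t, vector.getD (e + 1) 0)
    else bestLoop vector n rest (bestK, nxt)

def next_value_alt (vector : List Int) : Int :=
  let n := vector.length
  (bestLoop vector n (List.range (n - 1)) (0, vector.getD 1 0)).2

-- ===== PRECONDITION & SPEC =====
-- Pre_: A evaluates vector[1] when no suffix recurs, and B reads vector[1] up front:
-- both raise IndexError for lists shorter than 2; exactly those inputs are excluded.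
def Pre_next_value (vector : List Int) : Prop := 2 ≤ vector.length
instance (vector : List Int) : Decidable (Pre_next_value vector) := by unfold Pre_next_value; infer_instance
def pvWitness_next_value : List Int := [1, 2, 1, 3]

def Spec_next_value (vector : List Int) (out : Int) : Prop := out = next_value_alt vector
instance (vector : List Int) (out : Int) : Decidable (Spec_next_value vector out) := by unfold Spec_next_value; infer_instance

-- ===== CLAIM (what is proved, stated in full; the proofs are below) =====
def Claim_equal_next_value : Prop := ∀ (vector : List Int), Dom_next_value vector → Pre_next_value vector → Spec_next_value vector (next_value vector)


-- ===== LEMMAS AND PROOFS =====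

-- proof-only helpers
def pvG (v : List Int) (i : Nat) : Int := v.getD i 0

-- "the suffix of length k matches ending at position e"
def pvMk (v : List Int) (k e : Nat) : Prop :=
  ∀ j < k, pvG v (e - j) = pvG v (v.length - 1 - j)

-- longest-common-suffix value computed by B's inner while loop
def pvLcs (v : List Int) (e : Nat) : Nat := lcsLoop v v.length e 0

-- the maximal lcs over all admissible end positions
def pvK (v : List Int) : Nat := Finset.sup (Finset.range (v.length - 1)) (pvLcs v)

-- the length-k suffix of v
def pvSuf (v : List Int) (k : Nat) : List Int := v.drop (v.length - k)

lemma lcsLoop_spec (v : List Int) (n e t : Nat) (ht : t ≤ e + 1) :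
    t ≤ lcsLoop v n e t ∧ lcsLoop v n e t ≤ e + 1 ∧
    (∀ j, t ≤ j → j < lcsLoop v n e t → v.getD (e - j) 0 = v.getD (n - 1 - j) 0) ∧
    (lcsLoop v n e t ≤ e → v.getD (e - lcsLoop v n e t) 0 ≠ v.getD (n - 1 - lcsLoop v n e t) 0) := by
  fun_induction lcsLoop v n e t with
  | case1 t h ih =>
    obtain ⟨h1, h2⟩ := h
    obtain ⟨ih1, ih2, ih3, ih4⟩ := ih (by omega)
    refine ⟨by omega, ih2, ?_, ih4⟩
    intro j hj1 hj2
    rcases Nat.eq_or_lt_of_le hj1 with rfl | hlt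
    · exact h2
    · exact ih3 j hlt hj2
  | case2 t h =>
    rw [Classical.not_and_iff_not_or_not] at h
    refine ⟨le_rfl, by omega, by omega, ?_⟩
    intro hle
    rcases h with h | h
    · omega
    · exact h

lemma pvLcs_le (v : List Int) (e : Nat) : pvLcs v e ≤ e + 1 := by
  exact (lcsLoop_spec v v.length e 0 (by omega)).2.1

lemma pvLcs_mk (v : List Int) (e : Nat) : pvMk v (pvLcs v e) e := by
  intro j hj
  exact (lcsLoop_spec v v.length e 0 (by omega)).2.2.1 j (by omega) hj

-- k ≤ lcs(e)  ↔  the length-k suffix matches ending at e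
lemma le_pvLcs_iff (v : List Int) (k e : Nat) :
    k ≤ pvLcs v e ↔ k ≤ e + 1 ∧ pvMk v k e := by
  constructor
  · intro hk
    refine ⟨le_trans hk (pvLcs_le v e), ?_⟩
    intro j hj
    exact pvLcs_mk v e j (by omega)
  · rintro ⟨hk1, hmk⟩
    rcases Nat.lt_or_ge (pvLcs v e) k with h | h
    case inr => exact h
    case inl =>
      exfalso
      have h' : lcsLoop v v.length e 0 < k := h
      have hspec := lcsLoop_spec v v.length e 0 (by omega)
      exact hspec.2.2.2 (by omega) (hmk (lcsLoop v v.length e 0) h')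

lemma length_pvSuf (v : List Int) (k : Nat) (hk : k ≤ v.length) : (pvSuf v k).length = k := by
  simp [pvSuf]; omega

-- slice equality is pointwise equality (reindexed to end position e = p + k - 1)
lemma slice_eq_suf_iff (v : List Int) (p k : Nat) (_hk : 1 ≤ k) (hpk : p + k ≤ v.length) :
    ((v.drop p).take k = pvSuf v k) ↔ pvMk v k (p + k - 1) := by
  have hn : k ≤ v.length := by omega
  have hlen2 : (pvSuf v k).length = k := length_pvSuf v k hn
  constructor
  · intro hEq j hj
    have hi : k - 1 - j < k := by omega
    have h1 := congrArg (fun l => l[k - 1 - j]?) hEq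
    simp only [List.getElem?_take_of_lt hi, List.getElem?_drop, pvSuf] at h1
    have e1 : p + k - 1 - j = p + (k - 1 - j) := by omega
    have e2 : v.length - 1 - j = v.length - k + (k - 1 - j) := by omega
    simp only [pvG, List.getD_eq_getElem?_getD, e1, e2]
    rw [h1]
  · intro hmk
    apply List.ext_getElem?
    intro i
    by_cases hik : i < k
    · have hj : k - 1 - i < k := by omega
      have h1 := hmk (k - 1 - i) hj
      have e1 : p + k - 1 - (k - 1 - i) = p + i := by omega
      have e2 : v.length - 1 - (k - 1 - i) = v.length - k + i := by omega
      simp only [pvG, List.getD_eq_getElem?_getD, e1, e2] at h1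
      have hr1 : p + i < v.length := by omega
      have hr2 : v.length - k + i < v.length := by omega
      simp only [List.getElem?_take_of_lt hik, List.getElem?_drop, pvSuf]
      rw [List.getElem?_eq_getElem hr1, List.getElem?_eq_getElem hr2] at h1 ⊢
      simpa using h1
    · rw [List.getElem?_eq_none, List.getElem?_eq_none]
      · omega
      · simp; omega

lemma isExistLoop_iff (v pat : List Int) (l : List Int) :
    isExistLoop v pat l = true ↔
      ∃ i ∈ l, PySem.List.slice v (some i) (some (i + (pat.length : Int))) = pat := by
  induction l with
  | nil => simp [isExistLoop]
  | cons i rest ih =>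
    rw [isExistLoop]
    split_ifs with h
    · simp [h]
    · simp only [ih, List.mem_cons]
      constructor
      · rintro ⟨j, hj, hm⟩; exact ⟨j, Or.inr hj, hm⟩
      · rintro ⟨j, rfl | hj, hm⟩
        · exact absurd hm h
        · exact ⟨j, hj, hm⟩

-- A's existence test, characterised through lcs
lemma is_exist_iff (v : List Int) (k : Nat) (hk1 : 1 ≤ k) (hkn : k ≤ v.length) :
    is_exist_pattern v (pvSuf v k) = true ↔
      ∃ e : Nat, e + 1 < v.length ∧ k ≤ pvLcs v e := by
  have hlen : (pvSuf v k).length = k := length_pvSuf v k hkn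
  rw [is_exist_pattern, isExistLoop_iff, hlen]
  constructor
  · rintro ⟨i, hmem, hsl⟩
    rw [PySem.List.mem_pyRange_one] at hmem
    obtain ⟨h0, hlt⟩ := hmem
    set p := i.toNat with hp
    have hpk : p + k < v.length := by omega
    rw [PySem.List.slice_toNat v h0 (by omega)] at hsl
    have e1 : (i + (k : Int)).toNat - i.toNat = k := by omega
    rw [e1] at hsl
    have hmk : pvMk v k (p + k - 1) := (slice_eq_suf_iff v p k hk1 (by omega)).1 hsl
    refine ⟨p + k - 1, by omega, ?_⟩
    rw [le_pvLcs_iff]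
    exact ⟨by omega, hmk⟩
  · rintro ⟨e, he, hlcs⟩
    obtain ⟨hke, hmk⟩ := (le_pvLcs_iff v k e).1 hlcs
    set p := e + 1 - k with hp
    refine ⟨(p : Int), ?_, ?_⟩
    · rw [PySem.List.mem_pyRange_one]
      exact ⟨by omega, by omega⟩
    · rw [PySem.List.slice_toNat v (by omega) (by omega)]
      have e1 : ((p : Int) + (k : Int)).toNat - (p : Int).toNat = k := by omega
      rw [e1, Int.toNat_natCast]
      apply (slice_eq_suf_iff v p k hk1 (by omega)).2
      have e2 : p + k - 1 = e := by omega
      rw [e2]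
      exact hmk

lemma le_pvK_iff (v : List Int) (k : Nat) (hk1 : 1 ≤ k) :
    k ≤ pvK v ↔ ∃ e : Nat, e + 1 < v.length ∧ k ≤ pvLcs v e := by
  rw [pvK, Finset.le_sup_iff (show (0:ℕ) < k by omega)]
  constructor
  · rintro ⟨e, he, hk⟩
    have := Finset.mem_range.1 he
    exact ⟨e, by omega, hk⟩
  · rintro ⟨e, he, hk⟩
    exact ⟨e, Finset.mem_range.2 (by omega), hk⟩

lemma pvK_le (v : List Int) (_hn : 2 ≤ v.length) : pvK v ≤ v.length - 1 := by
  apply Finset.sup_le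
  intro e he
  have := pvLcs_le v e
  have := Finset.mem_range.1 he
  omega

-- A's main loop, once the flag is set: runs while the suffix still occurs, keeps the last one
lemma nvLoop_run (v : List Int) (hn : 2 ≤ v.length) (_hK : 1 ≤ pvK v) (a : Nat)
    (h1 : 1 ≤ a) (ha : a ≤ pvK v + 1) :
    nvLoop v (PySem.List.pyRange (a : Int) ((v.length : Int) + 1) 1) true (pvSuf v (a - 1))
      = (true, pvSuf v (pvK v)) := by
  have hKle := pvK_le v hn
  have main : ∀ m a, 1 ≤ a → a ≤ pvK v + 1 → pvK v + 1 - a = m →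
      nvLoop v (PySem.List.pyRange (a : Int) ((v.length : Int) + 1) 1) true (pvSuf v (a - 1))
        = (true, pvSuf v (pvK v)) := by
    intro m
    induction m with
    | zero =>
      intro a h1 ha hm
      have hiff : is_exist_pattern v (v.drop (v.length - a)) = true ↔ a ≤ pvK v := by
        have h1' := (is_exist_iff v a (by omega) (by omega)).trans ((le_pvK_iff v a (by omega)).symm)
        simpa [pvSuf] using h1'
      rw [PySem.List.pyRange_one_cons (by omega)]
      simp only [nvLoop]
      rw [PySem.List.slice_from_neg_natCast v a (by omega)]
      have hEa : is_exist_pattern v (v.drop (v.length - a)) = false := by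
        rw [Bool.eq_false_iff, Ne, hiff]; omega
      simp only [hEa, Bool.not_true, Bool.not_false, Bool.and_false,
        if_neg (by simp : ¬ (false = true))]
      have h2 : a - 1 = pvK v := by omega
      rw [h2]
    | succ m ih =>
      intro a h1 ha hm
      have hiff : is_exist_pattern v (v.drop (v.length - a)) = true ↔ a ≤ pvK v := by
        have h1' := (is_exist_iff v a (by omega) (by omega)).trans ((le_pvK_iff v a (by omega)).symm)
        simpa [pvSuf] using h1'
      rw [PySem.List.pyRange_one_cons (by omega)]
      simp only [nvLoop]
      rw [PySem.List.slice_from_neg_natCast v a (by omega)]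
      have hEa : is_exist_pattern v (v.drop (v.length - a)) = true := hiff.2 (by omega)
      simp only [hEa, Bool.not_true, Bool.false_and, if_neg (by simp : ¬ (false = true))]
      have hrec := ih (a + 1) (by omega) (by omega) (by omega)
      push_cast at hrec
      simpa [pvSuf] using hrec
  exact main (pvK v + 1 - a) a h1 ha rfl

-- first match of the length-k suffix: A's value() returns the element after it
lemma valueLoop_first (v : List Int) (k : Nat) (hk : 1 ≤ k) (ec : Nat)
    (hec : ec + 1 < v.length) (hlc : k ≤ pvLcs v ec) (hmin : ∀ e < ec, pvLcs v e < k)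
    (a : Nat) (hak : a + k ≤ ec + 1) :
    valueLoop v (pvSuf v k) (PySem.List.pyRange (a : Int) ((v.length : Int) - (k : Int)) 1)
      = some (pvG v (ec + 1)) := by
  have hkn : k ≤ v.length := by
    have := pvLcs_le v ec; omega
  have hlen : (pvSuf v k).length = k := length_pvSuf v k hkn
  have main : ∀ m a, a + k ≤ ec + 1 → ec + 1 - k - a = m →
      valueLoop v (pvSuf v k) (PySem.List.pyRange (a : Int) ((v.length : Int) - (k : Int)) 1)
        = some (pvG v (ec + 1)) := by
    intro m
    induction m with
    | zero =>
      intro a hak hm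
      have ha : a = ec + 1 - k := by omega
      rw [PySem.List.pyRange_one_cons (by omega)]
      simp only [valueLoop, hlen]
      rw [PySem.List.slice_toNat v (by omega) (by omega)]
      have e1 : ((a : Int) + (k : Int)).toNat - ((a : Int)).toNat = k := by omega
      have e2 : ((a : Int)).toNat = a := by omega
      rw [e1, e2]
      have hmk : pvMk v k (a + k - 1) := by
        have h1 := (le_pvLcs_iff v k ec).1 hlc
        have e3 : a + k - 1 = ec := by omega
        rw [e3]; exact h1.2
      rw [if_pos ((slice_eq_suf_iff v a k hk (by omega)).2 hmk)]
      have e4 : (a : Int) + (k : Int) = ((a + k : Nat) : Int) := by push_cast; ring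
      rw [e4, PySem.List.pyGet?_natCast]
      have e5 : a + k = ec + 1 := by omega
      rw [e5, List.getElem?_eq_getElem (by omega), pvG, List.getD_eq_getElem v 0 (by omega)]
    | succ m ih =>
      intro a hak hm
      rw [PySem.List.pyRange_one_cons (by omega)]
      simp only [valueLoop, hlen]
      rw [PySem.List.slice_toNat v (by omega) (by omega)]
      have e1 : ((a : Int) + (k : Int)).toNat - ((a : Int)).toNat = k := by omega
      have e2 : ((a : Int)).toNat = a := by omega
      rw [e1, e2]
      have hcond : ¬ ((v.drop a).take k = pvSuf v k) := by
        intro hEq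
        have hmk := (slice_eq_suf_iff v a k hk (by omega)).1 hEq
        have hle : k ≤ pvLcs v (a + k - 1) := by
          rw [le_pvLcs_iff]
          exact ⟨by omega, hmk⟩
        have := hmin (a + k - 1) (by omega)
        omega
      rw [if_neg hcond]
      have hrec := ih (a + 1) (by omega) (by omega)
      push_cast at hrec
      exact hrec
  exact main (ec + 1 - k - a) a hak rfl

lemma value_eq (v : List Int) (k : Nat) (hk : 1 ≤ k) (ec : Nat)
    (hec : ec + 1 < v.length) (hlc : k ≤ pvLcs v ec) (hmin : ∀ e < ec, pvLcs v e < k) :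
    value v (pvSuf v k) = some (pvG v (ec + 1)) := by
  have hk1 : k ≤ ec + 1 := le_trans hlc (pvLcs_le v ec)
  have hlen : (pvSuf v k).length = k := by
    apply length_pvSuf
    omega
  rw [value, hlen]
  have := valueLoop_first v k hk ec hec hlc hmin 0 (by omega)
  simpa using this

-- B's fold invariant
def pvGood (v : List Int) (a : Nat) (st : Nat × Int) : Prop :=
  st.1 = Finset.sup (Finset.range a) (pvLcs v) ∧
  ((st.1 = 0 ∧ st.2 = pvG v 1) ∨
   (∃ ec < a, pvLcs v ec = st.1 ∧ (∀ e < ec, pvLcs v e < st.1) ∧ st.2 = pvG v (ec + 1)))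

lemma bestLoop_inv (v : List Int) (a m : Nat) (st : Nat × Int) (h : pvGood v a st) :
    pvGood v (a + m) (bestLoop v v.length (List.range' a m) st) := by
  induction m generalizing a st with
  | zero => simpa [bestLoop] using h
  | succ m ih =>
    obtain ⟨bK, nx⟩ := st
    rw [List.range'_succ]
    simp only [bestLoop]
    obtain ⟨hsup, hdisj⟩ := h
    have hsup' : bK = Finset.sup (Finset.range a) (pvLcs v) := hsup
    by_cases hlt : bK < lcsLoop v v.length a 0
    · rw [if_pos hlt]
      have hgood : pvGood v (a + 1) (lcsLoop v v.length a 0, v.getD (a + 1) 0) := by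
        constructor
        · show lcsLoop v v.length a 0 = _
          rw [Finset.range_add_one, Finset.sup_insert, ← hsup']
          have : pvLcs v a = lcsLoop v v.length a 0 := rfl
          rw [this]
          omega
        · refine Or.inr ⟨a, by omega, rfl, ?_, rfl⟩
          intro e he
          have hle : pvLcs v e ≤ bK := by
            rw [hsup']
            exact Finset.le_sup (Finset.mem_range.2 he)
          omega
      have := ih (a + 1) _ hgood
      have e1 : a + 1 + m = a + (m + 1) := by omega
      rw [e1] at this
      exact this
    · rw [if_neg hlt]
      have hgood : pvGood v (a + 1) (bK, nx) := by
        constructor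
        · rw [Finset.range_add_one, Finset.sup_insert, ← hsup']
          have : pvLcs v a = lcsLoop v v.length a 0 := rfl
          rw [this]
          omega
        · rcases hdisj with h | ⟨ec, hec, h1, h2, h3⟩
          · exact Or.inl h
          · exact Or.inr ⟨ec, by omega, h1, h2, h3⟩
      have := ih (a + 1) _ hgood
      have e1 : a + 1 + m = a + (m + 1) := by omega
      rw [e1] at this
      exact this

lemma alt_good (v : List Int) :
    pvGood v (v.length - 1)
      ((bestLoop v v.length (List.range (v.length - 1)) (0, v.getD 1 0))) := by
  rw [List.range_eq_range']
  have h0 : pvGood v 0 (0, v.getD 1 0) := by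
    refine ⟨by simp, Or.inl ⟨rfl, rfl⟩⟩
  have := bestLoop_inv v 0 (v.length - 1) _ h0
  simpa using this

-- ===== VERDICT (by name: the statement is the Claim_ definition above) =====
theorem next_value_spec : Claim_equal_next_value := by
  intro v _hdom hpre
  have hn : 2 ≤ v.length := hpre
  show next_value v = next_value_alt v
  have hgood := alt_good v
  obtain ⟨hsup, hdisj⟩ := hgood
  have hsup' : (bestLoop v v.length (List.range (v.length - 1)) (0, v.getD 1 0)).1 = pvK v := hsup
  rw [next_value, next_value_alt]
  rw [PySem.List.pyRange_one_cons (by omega)]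
  simp only [nvLoop]
  rw [PySem.List.slice_from_neg_one]
  have hiff1 : is_exist_pattern v (v.drop (v.length - 1)) = true ↔ 1 ≤ pvK v := by
    have h1 := (is_exist_iff v 1 (by omega) (by omega)).trans ((le_pvK_iff v 1 (by omega)).symm)
    simpa [pvSuf] using h1
  by_cases hK : 1 ≤ pvK v
  · -- flag gets set; A's loop keeps the longest recurring suffix
    have hE1 : is_exist_pattern v (v.drop (v.length - 1)) = true := hiff1.2 hK
    simp only [hE1, Bool.not_true, Bool.false_and, if_neg (by simp : ¬ (false = true))]
    have hrun := nvLoop_run v hn hK 2 (by omega) (by omega)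
    have e2 : ((2 : Nat) : Int) = 1 + 1 := by norm_num
    rw [e2] at hrun
    have e3 : pvSuf v (2 - 1) = v.drop (v.length - 1) := rfl
    rw [e3] at hrun
    rw [hrun]
    -- B's state: the right disjunct must hold since pvK v ≥ 1
    rcases hdisj with ⟨h1, _⟩ | ⟨ec, hec, h1, h2, h3⟩
    · rw [hsup'] at h1; omega
    · rw [hsup'] at h1 h2
      have hval := value_eq v (pvK v) hK ec (by omega) (by omega) (by intro e he; exact h2 e he)
      show (value v (pvSuf v (pvK v))).getD 0 = _
      rw [hval, Option.getD_some, h3]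
  · -- no suffix recurs: the flag stays false and both sides return vector[1]
    have hE1 : is_exist_pattern v (v.drop (v.length - 1)) = false := by
      rw [Bool.eq_false_iff, Ne, hiff1]; omega
    simp only [hE1, Bool.not_false, Bool.and_self]
    show (PySem.List.pyGet? v 1).getD 0 = _
    have hg : (PySem.List.pyGet? v 1).getD 0 = pvG v 1 := by
      rw [show (1 : Int) = ((1 : Nat) : Int) by norm_num, PySem.List.pyGet?_natCast,
        List.getElem?_eq_getElem (by omega : 1 < v.length), Option.getD_some,
        pvG, List.getD_eq_getElem v 0 (by omega)]
    rw [hg]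
    rcases hdisj with ⟨_, h2⟩ | ⟨ec, hec, h1, h2, h3⟩
    · rw [h2]
    · have hec0 : ec = 0 := by
        by_contra hne
        have := h2 0 (by omega)
        omega
      rw [h3, hec0]
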